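-- pv_equiv track=rewrite | github.com/mod-elise/advent_of_code | 2023/day_1b_trebuchet.py | get_last_word
-- ===== SOURCE A (Python) =====
-- def get_last_word(line):
--     word_positions = {}
--     number_words = ["one", "two", "three", "four", "five", "six", "seven", "eight", "nine"]
--     for number_word in number_words:
--         if number_word in line:
--             word_positions[number_word] = line.rfind(number_word)
--     if word_positions:
--         max_word = max(word_positions, key=lambda x: word_positions[x])
--         return word_positions[max_word], max_word
--     else:
--         return -1, -1
-- ===== SOURCE B (Python) =====
-- def get_last_word(line):
--     number_words = ("one", "two", "three", "four", "five", "six", "seven", "eight", "nine")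
--     for i in range(len(line) - 1, -1, -1):
--         for word in number_words:
--             if line.startswith(word, i):
--                 return i, word
--     return -1, -1
-- ===== Notes on version B (the rewrite author's own statement) =====
-- stated objective: simpler
-- what changed: Replaces the nine rfind calls plus dict and max-by-value selection with a single right-to-left positional scan that returns at the first index where some number-word starts, which is necessarily the rightmost match.
-- outside the precondition, e.g. on get_last_word('abc'): A returns (-1, -1), B returns (-1, -1)
import Mathlib
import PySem

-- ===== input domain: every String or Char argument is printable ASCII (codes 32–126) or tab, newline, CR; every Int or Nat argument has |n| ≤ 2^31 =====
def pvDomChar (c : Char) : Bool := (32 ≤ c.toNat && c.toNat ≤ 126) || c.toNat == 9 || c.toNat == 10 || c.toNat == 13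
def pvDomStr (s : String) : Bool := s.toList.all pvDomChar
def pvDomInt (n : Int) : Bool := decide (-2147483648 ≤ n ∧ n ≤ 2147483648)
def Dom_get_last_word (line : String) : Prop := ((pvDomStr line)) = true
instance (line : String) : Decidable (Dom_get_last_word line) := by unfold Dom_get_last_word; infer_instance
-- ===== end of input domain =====

-- B replaces A's nine-rfind/dict/max-by-value pipeline by one right-to-left positional scan that
-- stops at the rightmost index where a number-word starts (objective: simpler; same asymptotic cost).


-- ===== PORT A =====
def pvNumberWords : List String :=
  ["one", "two", "three", "four", "five", "six", "seven", "eight", "nine"]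

def get_last_word (line : String) : Int × String :=
  let d : PySem.Dict String Int :=
    pvNumberWords.foldl
      (fun d w => if PySem.Str.isIn w line then d.insert w (PySem.Str.rfind line w) else d)
      PySem.Dict.empty
  if d.size ≠ 0 then
    match PySem.List.max? d.keys (fun x => d.getD x 0) with
    | some maxWord => (d.getD maxWord 0, maxWord)
    | none => (-1, "")  -- unreachable: d is nonempty here
  else
    (-1, "")  -- Python returns the int pair (-1, -1), not a str: excluded by Pre_

-- ===== PORT B =====
-- inner 'for word in number_words: if line.startswith(word, i): return i, word' is find? over
-- the words; 'line.startswith(word, i)' with 0 ≤ i ≤ len(line) is exactly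
-- Chars.startswith (line[i:]) word, and the outer loop runs i from len(line)-1 down to 0.
def pvAltGo (cs : List Char) : Nat → Option (Nat × String)
  | 0 => none
  | j + 1 =>
    match pvNumberWords.find? (fun w => PySem.Chars.startswith (cs.drop j) w.toList) with
    | some w => some (j, w)
    | none => pvAltGo cs j

def get_last_word_alt (line : String) : Int × String :=
  match pvAltGo line.toList line.toList.length with
  | some (i, w) => ((i : Int), w)
  | none => (-1, "")  -- Python B returns the int pair (-1, -1): excluded by Pre_

-- ===== PRECONDITION & SPEC =====
-- Pre_ excludes lines containing none of the nine number-words: there A (and B) return the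
-- int pair (-1, -1), which is not a value of the declared tuple[int, str] return type.
def Pre_get_last_word (line : String) : Prop :=
  pvNumberWords.any (fun w => PySem.Str.isIn w line) = true
instance (line : String) : Decidable (Pre_get_last_word line) := by
  unfold Pre_get_last_word; infer_instance

def pvWitness_get_last_word : String := "xtwone3four"

def Spec_get_last_word (line : String) (out : Int × String) : Prop := out = get_last_word_alt line
instance (line : String) (out : Int × String) : Decidable (Spec_get_last_word line out) := by
  unfold Spec_get_last_word; infer_instance

-- ===== CLAIM (what is proved, stated in full; the proofs are below) =====
def Claim_equal_get_last_word : Prop :=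
  ∀ (line : String), Dom_get_last_word line → Pre_get_last_word line →
    Spec_get_last_word line (get_last_word line)

-- ===== LEMMAS AND PROOFS =====

-- no two of the nine words can start at the same position (none is a prefix of another)
theorem pv_words_unique {w1 w2 : String} (h1 : w1 ∈ pvNumberWords) (h2 : w2 ∈ pvNumberWords)
    {xs : List Char} (p1 : w1.toList.isPrefixOf xs = true) (p2 : w2.toList.isPrefixOf xs = true) :
    w1 = w2 := by
  have H : ∀ u ∈ pvNumberWords, ∀ v ∈ pvNumberWords, u.toList.isPrefixOf v.toList = true → u = v := by
    decide
  rw [List.isPrefixOf_iff_prefix] at p1 p2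
  rcases List.prefix_or_prefix_of_prefix p1 p2 with h | h
  · exact H w1 h1 w2 h2 (List.isPrefixOf_iff_prefix.mpr h)
  · exact (H w2 h2 w1 h1 (List.isPrefixOf_iff_prefix.mpr h)).symm

theorem pv_words_ne_nil {w : String} (h : w ∈ pvNumberWords) : w.toList ≠ [] := by
  have H : ∀ w ∈ pvNumberWords, w.toList ≠ [] := by decide
  exact H w h

theorem pv_find?_unique {α : Type} {p : α → Bool} {l : List α} {a : α}
    (ha : a ∈ l) (hp : p a = true) (huniq : ∀ b ∈ l, p b = true → b = a) :
    l.find? p = some a := by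
  induction l with
  | nil => cases ha
  | cons x l ih =>
    by_cases hx : p x = true
    · have := huniq x (List.mem_cons_self ..) hx
      subst this
      simp [List.find?, hx]
    · have hax : a ≠ x := fun h => hx (h ▸ hp)
      have ha' : a ∈ l := by
        rcases List.mem_cons.mp ha with h | h
        · exact absurd h hax
        · exact h
      simp only [List.find?]
      rw [Bool.not_eq_true] at hx
      rw [hx]
      exact ih ha' (fun b hb hpb => huniq b (List.mem_cons_of_mem _ hb) hpb)

-- characterization of PySem's rfind scan (it walks j down to 0)
theorem pv_rfind_go_ge {cs sub : List Char} {k : Nat} :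
    ∀ {j : Nat}, k ≤ j → sub.isPrefixOf (cs.drop k) = true →
      (k : Int) ≤ PySem.Chars.rfind.go cs sub j := by
  intro j
  induction j with
  | zero =>
    intro hk hp
    interval_cases k
    rw [List.drop_zero] at hp
    simp [PySem.Chars.rfind.go, List.isPrefixOf_iff_prefix.mp hp]
  | succ j ih =>
    intro hk hp
    by_cases hj : sub.isPrefixOf (cs.drop (j + 1)) = true
    · simp only [PySem.Chars.rfind.go, hj, if_pos]
      exact_mod_cast hk
    · have hk' : k ≤ j := by
        rcases Nat.lt_or_ge k (j + 1) with h | h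
        · omega
        · have : k = j + 1 := by omega
          subst this; exact absurd hp hj
      simp only [PySem.Chars.rfind.go, hj]
      simpa using ih hk' hp

theorem pv_rfind_go_eq {cs sub : List Char} {i : Nat} :
    ∀ {j : Nat}, i ≤ j → sub.isPrefixOf (cs.drop i) = true →
      (∀ k, i < k → k ≤ j → sub.isPrefixOf (cs.drop k) = false) →
      PySem.Chars.rfind.go cs sub j = (i : Int) := by
  intro j
  induction j with
  | zero =>
    intro hij hp _
    interval_cases i
    rw [List.drop_zero] at hp
    simp [PySem.Chars.rfind.go, List.isPrefixOf_iff_prefix.mp hp]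
  | succ j ih =>
    intro hij hp hmax
    by_cases hi : i = j + 1
    · subst hi
      simp [PySem.Chars.rfind.go, List.isPrefixOf_iff_prefix.mp hp]
    · have hij' : i ≤ j := by omega
      have hj : sub.isPrefixOf (cs.drop (j + 1)) = false := hmax _ (by omega) (le_refl _)
      simp only [PySem.Chars.rfind.go, hj]
      simp only [Bool.false_eq_true, if_false]
      exact ih hij' hp (fun k h1 h2 => hmax k h1 (by omega))

-- characterization of B's scan: it returns the first hit while walking right to left
theorem pv_altGo_eq {cs : List Char} {i : Nat} {w : String} :
    ∀ {j : Nat}, i < j →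
      pvNumberWords.find? (fun w' => PySem.Chars.startswith (cs.drop i) w'.toList) = some w →
      (∀ k, i < k → k < j →
        pvNumberWords.find? (fun w' => PySem.Chars.startswith (cs.drop k) w'.toList) = none) →
      pvAltGo cs j = some (i, w) := by
  intro j
  induction j with
  | zero => omega
  | succ j ih =>
    intro hij hfind hnone
    by_cases hi : i = j
    · subst hi
      simp [pvAltGo, hfind]
    · have hj : pvNumberWords.find? (fun w' => PySem.Chars.startswith (cs.drop j) w'.toList) = none :=
        hnone j (by omega) (by omega)
      simp only [pvAltGo, hj]
      exact ih (by omega) hfind (fun k h1 h2 => hnone k h1 (by omega))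

theorem pv_prefix_lt_length {cs sub : List Char} {j : Nat} (hne : sub ≠ [])
    (hp : sub <+: cs.drop j) : j < cs.length := by
  by_contra h
  rw [List.drop_eq_nil_of_le (by omega)] at hp
  exact hne (List.prefix_nil.mp hp)

-- rfind of an occurring nonempty word: the greatest matching start position
theorem pv_rfind_spec {cs sub : List Char} (hne : sub ≠ [])
    (hocc : ∃ j, sub <+: cs.drop j) :
    ∃ i : Nat, PySem.Chars.rfind cs sub = (i : Int) ∧ i < cs.length ∧
      sub.isPrefixOf (cs.drop i) = true ∧
      ∀ k, i < k → sub.isPrefixOf (cs.drop k) = false := by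
  classical
  obtain ⟨j0, hj0⟩ := hocc
  set P : Nat → Prop := fun j => sub <+: cs.drop j with hP
  have hj0len : j0 < cs.length := pv_prefix_lt_length hne hj0
  have hfg := Nat.findGreatest_spec (P := P) (m := j0) (n := cs.length) (by omega) hj0
  set i := Nat.findGreatest P cs.length with hi
  have hile : i ≤ cs.length := Nat.findGreatest_le _
  have hmax : ∀ k, i < k → sub.isPrefixOf (cs.drop k) = false := by
    intro k hk
    rw [Bool.eq_false_iff]
    intro hpk
    rw [List.isPrefixOf_iff_prefix] at hpk
    have hklen : k < cs.length := pv_prefix_lt_length hne hpk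
    exact absurd hpk (Nat.findGreatest_is_greatest hk (by omega))
  have hilen : i < cs.length := pv_prefix_lt_length hne hfg
  refine ⟨i, ?_, hilen, List.isPrefixOf_iff_prefix.mpr hfg, hmax⟩
  show PySem.Chars.rfind.go cs sub cs.length = (i : Int)
  exact pv_rfind_go_eq hile (List.isPrefixOf_iff_prefix.mpr hfg)
    (fun k h1 _ => hmax k h1)

-- A's loop with its membership guard = an unconditional insert loop over the matched words
theorem pv_foldl_filter (line : String) :
    ∀ (ws : List String) (d : PySem.Dict String Int),
      ws.foldl (fun d w => if PySem.Str.isIn w line then d.insert w (PySem.Str.rfind line w) else d) d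
      = (ws.filter (fun w => PySem.Str.isIn w line)).foldl
          (fun d w => d.insert w (PySem.Str.rfind line w)) d := by
  intro ws
  induction ws with
  | nil => intro d; rfl
  | cons x ws ih =>
    intro d
    by_cases hx : PySem.Str.isIn x line = true
    · simp only [List.foldl_cons, List.filter_cons, hx, if_true]
      exact ih _
    · rw [Bool.not_eq_true] at hx
      simp only [List.foldl_cons, List.filter_cons, hx, if_false, Bool.false_eq_true]
      exact ih _

theorem pv_dict_items (line : String) :
    (pvNumberWords.foldl
      (fun d w => if PySem.Str.isIn w line then d.insert w (PySem.Str.rfind line w) else d)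
      PySem.Dict.empty).items
    = (pvNumberWords.filter (fun w => PySem.Str.isIn w line)).map
        (fun w => (w, PySem.Str.rfind line w)) := by
  rw [pv_foldl_filter]
  have h := PySem.Dict.items_foldl_insert_fresh
      (l := pvNumberWords.filter (fun w => PySem.Str.isIn w line))
      (k := fun w => w) (v := fun w => PySem.Str.rfind line w) (d := PySem.Dict.empty)
      (by intro a _; simp [PySem.Dict.contains_empty])
      (by
        rw [List.map_id']
        exact (by decide : pvNumberWords.Nodup).filter _)
  simpa using h

-- ===== VERDICT (by name: the statement is the Claim_ definition above) =====
theorem get_last_word_spec : Claim_equal_get_last_word := by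
  intro line _ hpre
  have hpre' : pvNumberWords.any (fun w => PySem.Str.isIn w line) = true := hpre
  obtain ⟨w0, hw0mem, hw0⟩ := List.any_eq_true.mp hpre'
  show get_last_word line = get_last_word_alt line
  simp only [get_last_word, get_last_word_alt]
  set D : PySem.Dict String Int :=
    pvNumberWords.foldl
      (fun d w => if PySem.Str.isIn w line then d.insert w (PySem.Str.rfind line w) else d)
      PySem.Dict.empty with hD
  set matched := pvNumberWords.filter (fun w => PySem.Str.isIn w line) with hmatched
  have hitems : D.items = matched.map (fun w => (w, PySem.Str.rfind line w)) := pv_dict_items line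
  have hmne : matched ≠ [] :=
    List.ne_nil_of_mem (List.mem_filter.mpr ⟨hw0mem, hw0⟩)
  have hkeys : D.keys = matched := by
    simp [PySem.Dict.keys, hitems, Function.comp_def]
  have hnodk : D.keys.Nodup := by
    rw [hkeys]
    exact (by decide : pvNumberWords.Nodup).filter _
  have hval : ∀ w ∈ matched, D.getD w 0 = PySem.Str.rfind line w := by
    intro w hw
    have hmem : (w, PySem.Str.rfind line w) ∈ D.items := by
      rw [hitems]; exact List.mem_map.mpr ⟨w, hw, rfl⟩
    have hg := PySem.Dict.get?_of_mem_items D hmem hnodk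
    simp [PySem.Dict.getD, hg]
  have hsize : D.size ≠ 0 := by
    simp only [PySem.Dict.size, hitems, List.length_map]
    simpa [List.length_eq_zero_iff] using hmne
  rw [if_pos hsize]
  cases hmax : PySem.List.max? D.keys (fun x => D.getD x 0) with
  | none =>
    exact absurd (hkeys ▸ (PySem.List.max?_eq_none_iff _ _).mp hmax) hmne
  | some m =>
    have hmmem : m ∈ matched := hkeys ▸ PySem.List.max?_mem hmax
    have hmle : ∀ y ∈ matched, D.getD y 0 ≤ D.getD m 0 := by
      intro y hy
      exact PySem.List.max?_isMax hmax y (hkeys ▸ hy)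
    have hmW : m ∈ pvNumberWords := (List.mem_filter.mp hmmem).1
    have hmIn : PySem.Chars.isIn m.toList line.toList = true := by
      have := (List.mem_filter.mp hmmem).2
      rwa [PySem.Str.isIn_eq] at this
    have hocc : ∃ j, m.toList <+: line.toList.drop j :=
      (PySem.Chars.exists_prefix_drop_iff_isIn _ _).mpr hmIn
    obtain ⟨i, hrfind, hilen, hip, himax⟩ := pv_rfind_spec (pv_words_ne_nil hmW) hocc
    have hvm : D.getD m 0 = (i : Int) := by
      rw [hval m hmmem, PySem.Str.rfind_eq, hrfind]
    have hfind : pvNumberWords.find?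
        (fun w' => PySem.Chars.startswith (line.toList.drop i) w'.toList) = some m := by
      apply pv_find?_unique hmW
      · simpa [PySem.Chars.startswith] using hip
      · intro b hb hpb
        exact pv_words_unique hb hmW (by simpa [PySem.Chars.startswith] using hpb) hip
    have hnone : ∀ k, i < k → k < line.toList.length →
        pvNumberWords.find? (fun w' => PySem.Chars.startswith (line.toList.drop k) w'.toList) = none := by
      intro k hik hklen
      cases hf : pvNumberWords.find?
          (fun w' => PySem.Chars.startswith (line.toList.drop k) w'.toList) with
      | none => rfl
      | some w =>
        exfalso
        have hwmem := List.mem_of_find?_eq_some hf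
        have hpw : w.toList.isPrefixOf (line.toList.drop k) = true := by
          simpa [PySem.Chars.startswith] using List.find?_some hf
        have hwin : PySem.Str.isIn w line = true := by
          rw [PySem.Str.isIn_eq]
          exact (PySem.Chars.exists_prefix_drop_iff_isIn _ _).mp
            ⟨k, List.isPrefixOf_iff_prefix.mp hpw⟩
        have hwm : w ∈ matched := List.mem_filter.mpr ⟨hwmem, hwin⟩
        have hge : (k : Int) ≤ PySem.Chars.rfind line.toList w.toList :=
          pv_rfind_go_ge (le_of_lt hklen) hpw
        have hle : D.getD w 0 ≤ (i : Int) := hvm ▸ hmle w hwm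
        rw [hval w hwm, PySem.Str.rfind_eq] at hle
        have : (k : Int) ≤ (i : Int) := le_trans hge hle
        have : k ≤ i := by exact_mod_cast this
        omega
    have haltB : pvAltGo line.toList line.toList.length = some (i, m) :=
      pv_altGo_eq hilen hfind hnone
    rw [haltB]
    show (D.getD m 0, m) = ((i : Int), m)
    rw [hvm]
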